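-- pv_equiv track=rewrite | github.com/ljhyung/TIL | kakao_algo/2020_blind/PGS_괄호 변환.py | solution
-- ===== SOURCE A (Python) =====
-- def solution(p):
--     answer = ''
--     def sol(p):
--         if p == '':
--             return ''
--         u,v = '', ''
--         a, b = 0,0
--         res = 0
--         flag = True
--         for i in range(len(p)):
--             if p[i]=='(':
--                 a += 1
--                 res += 1
--             else:
--                 b += 1
--                 res -= 1
--             if res<0:
--                 flag = False
--             if a==b:
--                 u = p[:i+1]
--                 v = p[i+1:]
--                 break
--         if not flag:
--             nu = ''
--             for i in range(1,len(u)-1):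
--                 if u[i]=='(':
--                     nu += ')'
--                 else:
--                     nu += '('
--             word = '(' + sol(v) + ')' + nu
--         else:
--             word = u + sol(v)
--         return word
--
--     answer = sol(p)
--     return answer
-- ===== SOURCE B (Python) =====
-- def solution(p):
--     # Iterative: split p into minimal balanced-prefix units in one pass,
--     # then fold the unit list from right to left to assemble the answer.
--     units = []
--     s = p
--     while s:
--         bal = 0
--         neg = False
--         cut = None
--         for i, c in enumerate(s):
--             bal += 1 if c == '(' else -1
--             if bal < 0:
--                 neg = True
--             if bal == 0:
--                 cut = i + 1
--                 break
--         if cut is None: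
--             units.append((neg, ''))
--             break
--         u, s = s[:cut], s[cut:]
--         if neg:
--             units.append((True, ''.join(')' if ch == '(' else '(' for ch in u[1:-1])))
--         else:
--             units.append((False, u))
--     res = ''
--     for wrap, x in reversed(units):
--         res = '(' + res + ')' + x if wrap else x + res
--     return res
-- ===== Notes on version B (the rewrite author's own statement) =====
-- stated objective: alternative
-- what changed: Replaces A's direct recursion (each call re-scans for the minimal balanced prefix and builds the word around the recursive result) by an iterative two-pass scheme: a first loop splits the whole string into minimal balanced-prefix units recording (wrap?, payload) for each, and a second loop folds that unit list right-to-left to assemble the answer.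
import Mathlib
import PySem

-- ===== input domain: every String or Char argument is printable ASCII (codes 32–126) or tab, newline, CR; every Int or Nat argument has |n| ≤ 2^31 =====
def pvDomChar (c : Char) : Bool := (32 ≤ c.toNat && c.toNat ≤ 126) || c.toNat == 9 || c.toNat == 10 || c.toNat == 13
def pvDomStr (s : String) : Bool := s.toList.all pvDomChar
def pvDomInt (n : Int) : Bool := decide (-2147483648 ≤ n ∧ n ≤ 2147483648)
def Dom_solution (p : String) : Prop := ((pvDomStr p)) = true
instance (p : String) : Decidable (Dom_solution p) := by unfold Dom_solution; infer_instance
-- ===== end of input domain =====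

-- B is an iterative two-pass re-implementation (split into minimal balanced units, then fold
-- the unit list right-to-left) of A's direct recursion; objective: alternative decomposition.

-- ===== PORT A =====
-- A's inner for-loop: scan characters keeping a, b, res and flag; break when a == b,
-- returning (u, v, flag); if the loop ends without break, u = '' and v = ''.
def aScan : List Char → List Char → Int → Int → Int → Bool → (List Char × List Char × Bool)
  | [], _, _, _, _, flag => ([], [], flag)
  | c :: rest, acc, a, b, res, flag =>
    let a' := if c = '(' then a + 1 else a
    let b' := if c = '(' then b else b + 1
    let res' := if c = '(' then res + 1 else res - 1
    let flag' := if res' < 0 then false else flag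
    if a' = b' then (acc ++ [c], rest, flag')
    else aScan rest (acc ++ [c]) a' b' res' flag'

-- A's nu-building loop: iterate the characters u[1], …, u[len(u)-2] (= the slice
-- u[1:len(u)-1]) appending the flipped parenthesis to nu.
def aNu (u : List Char) : List Char :=
  (PySem.List.slice u (some 1) (some (PySem.List.len u - 1))).foldl
    (fun nu c => nu ++ [if c = '(' then ')' else '(']) []

theorem aScan_snd_lt : ∀ (s acc : List Char) (a b res : Int) (flag : Bool), s ≠ [] →
    (aScan s acc a b res flag).2.1.length < s.length := by
  intro s
  induction s with
  | nil => intro _ _ _ _ _ h; exact absurd rfl h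
  | cons c rest ih =>
    intro acc a b res flag _
    simp only [aScan]
    split_ifs with h1 h2 h2 <;>
      first
        | (rcases Decidable.em (rest = []) with h | h
           · subst h; simp [aScan]
           · exact Nat.lt_succ_of_lt (ih _ _ _ _ _ h))
        | simp

-- A's recursive sol
def sol (p : List Char) : List Char :=
  if p = [] then []
  else
    let t := aScan p [] 0 0 0 true
    if t.2.2 = false then
      '(' :: sol t.2.1 ++ ')' :: aNu t.1
    else t.1 ++ sol t.2.1
termination_by p.length
decreasing_by
  all_goals exact aScan_snd_lt p [] 0 0 0 true (by assumption)

def solution (p : String) : String := String.ofList (sol p.toList)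

-- ===== PORT B =====
-- B's inner scan: return (some cut, neg) for the minimal balanced-prefix cut index, or
-- (none, neg) if the running sum never returns to 0.
def findCut : List Char → Int → Bool → Nat → (Option Nat × Bool)
  | [], _, neg, _ => (none, neg)
  | c :: rest, bal, neg, i =>
    let bal' := bal + (if c = '(' then 1 else -1)
    let neg' := neg || decide (bal' < 0)
    if bal' = 0 then (some (i + 1), neg') else findCut rest bal' neg' (i + 1)

-- B's flip of u[1:-1]
def bFlip (u : List Char) : List Char :=
  (PySem.List.slice u (some 1) (some (-1))).map (fun ch => if ch = '(' then ')' else '(')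

theorem findCut_some_pos : ∀ (s : List Char) (bal : Int) (neg : Bool) (i k : Nat) (neg' : Bool),
    findCut s bal neg i = (some k, neg') → i < k := by
  intro s
  induction s with
  | nil => intro _ _ _ _ _ h; simp [findCut] at h
  | cons c rest ih =>
    intro bal neg i k neg' h
    simp only [findCut] at h
    split_ifs at h with h1 h2 h2 <;>
      first
        | (cases h; omega)
        | exact Nat.lt_of_succ_lt (ih _ _ _ _ _ h)

-- B's first pass: the list of units, each (wrap?, payload)
def splitUnits (s : List Char) : List (Bool × List Char) :=
  if hs : s = [] then []
  else
    match h : findCut s 0 false 0 with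
    | (none, neg) => [(neg, [])]
    | (some k, neg) =>
      (if neg then (true, bFlip (s.take k)) else (false, s.take k)) :: splitUnits (s.drop k)
termination_by s.length
decreasing_by
  have hk : 0 < k := findCut_some_pos s 0 false 0 k neg h
  have : s.length ≠ 0 := fun hh => hs (List.eq_nil_of_length_eq_zero hh)
  simp only [List.length_drop]; omega

-- B's second pass: fold the units right-to-left
def solution_alt (p : String) : String :=
  String.ofList ((splitUnits p.toList).foldr
    (fun t res => if t.1 then '(' :: res ++ ')' :: t.2 else t.2 ++ res) [])

-- ===== PRECONDITION & SPEC =====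
def Spec_solution (p : String) (out : String) : Prop := out = solution_alt p
instance (p : String) (out : String) : Decidable (Spec_solution p out) := by unfold Spec_solution; infer_instance

-- ===== CLAIM (what is proved, stated in full; the proofs are below) =====
def Claim_equal_solution : Prop := ∀ (p : String), Dom_solution p → Spec_solution p (solution p)

-- ===== LEMMAS AND PROOFS =====

-- A's scan agrees with B's cut finder (given res = a - b and flag = !neg)
theorem scan_eq_findCut : ∀ (s acc : List Char) (a b : Int) (neg : Bool) (i : Nat),
    aScan s acc a b (a - b) (!neg) =
      (match findCut s (a - b) neg i with
       | (none, neg') => ([], [], !neg')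
       | (some k, neg') => (acc ++ s.take (k - i), s.drop (k - i), !neg')) := by
  intro s
  induction s with
  | nil => intro acc a b neg i; simp [aScan, findCut]
  | cons c rest ih =>
    intro acc a b neg i
    simp only [aScan, findCut]
    by_cases hc : c = '(' <;> simp only [hc, if_pos, reduceIte]
    · -- c = '(' : step is +1
      by_cases hz : a + 1 = b
      · rw [if_pos hz, if_pos (show a - b + 1 = 0 by omega),
          show a - b + 1 = 0 from by omega]
        simp
      · rw [if_neg hz, if_neg (show ¬(a - b + 1 = 0) by omega)]
        have hflag : (if a - b + 1 < 0 then false else !neg)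
            = !(neg || decide (a - b + 1 < 0)) := by
          by_cases h : a - b + 1 < 0 <;> simp [h]
        rw [hflag, show a - b + 1 = a + 1 - b from by ring]
        rw [ih (acc ++ ['(']) (a + 1) b (neg || decide (a + 1 - b < 0)) (i + 1)]
        rcases hF : findCut rest (a + 1 - b) (neg || decide (a + 1 - b < 0)) (i + 1)
          with ⟨ok, n⟩
        cases ok with
        | none => simp
        | some k =>
          have hk : i + 1 < k := findCut_some_pos rest _ _ _ _ _ hF
          simp only
          rw [show k - i = (k - (i + 1)) + 1 from by omega]
          simp [List.take_succ_cons, List.drop_succ_cons]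
    · -- c ≠ '(' : step is -1
      rw [show a - b + -1 = a - (b + 1) from by ring]
      rw [show a - b - 1 = a - (b + 1) from by ring]
      by_cases hz : a = b + 1
      · rw [if_pos hz, if_pos (show a - (b + 1) = 0 by omega),
          show a - (b + 1) = 0 from by omega]
        simp
      · rw [if_neg hz, if_neg (show ¬(a - (b + 1) = 0) by omega)]
        have hflag : (if a - (b + 1) < 0 then false else !neg)
            = !(neg || decide (a - (b + 1) < 0)) := by
          by_cases h : a - (b + 1) < 0 <;> simp [h]
        rw [hflag]
        rw [ih (acc ++ [c]) a (b + 1) (neg || decide (a - (b + 1) < 0)) (i + 1)]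
        rcases hF : findCut rest (a - (b + 1)) (neg || decide (a - (b + 1) < 0)) (i + 1)
          with ⟨ok, n⟩
        cases ok with
        | none => simp
        | some k =>
          have hk : i + 1 < k := findCut_some_pos rest _ _ _ _ _ hF
          simp only
          rw [show k - i = (k - (i + 1)) + 1 from by omega]
          simp [List.take_succ_cons, List.drop_succ_cons]

-- the two flips agree
theorem flip_eq (u : List Char) : aNu u = bFlip u := by
  unfold aNu bFlip
  have hs : PySem.List.slice u (some 1) (some (PySem.List.len u - 1))
      = PySem.List.slice u (some 1) (some (-1)) := by
    cases u with
    | nil => decide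
    | cons c rest =>
      have h1 : PySem.List.len (c :: rest) - 1 = ((rest.length : Nat) : Int) := by
        simp [PySem.List.len_eq]
      rw [h1, show ((1:Int) = ((1:Nat):Int)) from by norm_num, PySem.List.slice_natCast]
      simp [PySem.List.slice]
  rw [hs]
  simpa using PySem.List.foldl_append_singleton_eq_map
    (f := fun ch => if ch = '(' then ')' else '(')
    (l := PySem.List.slice u (some 1) (some (-1))) (acc := [])

-- main lemma: the recursion equals the fold over the unit list (strong induction on length)
theorem sol_eq_aux : ∀ (n : Nat) (p : List Char), p.length ≤ n →
    sol p = (splitUnits p).foldr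
      (fun t res => if t.1 then '(' :: res ++ ')' :: t.2 else t.2 ++ res) [] := by
  intro n
  induction n with
  | zero =>
    intro p hp
    have : p = [] := List.eq_nil_of_length_eq_zero (Nat.le_zero.mp hp)
    subst this; simp [sol, splitUnits]
  | succ n ihn =>
    intro p hp
    by_cases hnil : p = []
    · subst hnil; simp [sol, splitUnits]
    · have hscan : aScan p [] 0 0 0 true =
          (match findCut p 0 false 0 with
           | (none, neg') => ([], [], !neg')
           | (some k, neg') => (p.take k, p.drop k, !neg')) := by
        have := scan_eq_findCut p [] (0 : Int) (0 : Int) false 0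
        simpa using this
      rw [sol, splitUnits]
      simp only [hnil]
      rcases hF : findCut p 0 false 0 with ⟨ok, neg⟩
      cases ok with
      | none =>
        rw [hscan, hF]
        cases neg <;> simp [sol, aNu, PySem.List.slice]
      | some k =>
        have hk : 0 < k := findCut_some_pos p 0 false 0 k neg hF
        have hdrop : (p.drop k).length ≤ n := by
          have : p.length ≠ 0 := fun hh => hnil (List.eq_nil_of_length_eq_zero hh)
          simp only [List.length_drop]; omega
        rw [hscan, hF]
        cases neg with
        | false => simp [ihn _ hdrop]
        | true => simp [ihn _ hdrop, flip_eq]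

theorem sol_eq (p : List Char) :
    sol p = (splitUnits p).foldr
      (fun t res => if t.1 then '(' :: res ++ ')' :: t.2 else t.2 ++ res) [] :=
  sol_eq_aux p.length p le_rfl

-- ===== VERDICT (by name: the statement is the Claim_ definition above) =====
theorem solution_spec : Claim_equal_solution := by
  intro p _
  unfold Spec_solution solution solution_alt
  rw [sol_eq]
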